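-- pv_equiv track=rewrite | github.com/sarbeshtiwari/arc-agi-3 | environment_files/mc10/mc10.py | _edge_count
-- ===== SOURCE A (Python) =====
-- from typing import Any, Dict, List, Optional, Set, Tuple
--
-- GridPos = Tuple[int, int]
--
-- def _edge_count(carved: Set[GridPos]) -> int:
--     edges = 0
--     for row, col in carved:
--         if (row + 1, col) in carved:
--             edges += 1
--         if (row, col + 1) in carved:
--             edges += 1
--     return edges
-- ===== SOURCE B (Python) =====
-- def _edge_count(carved):
--     by_row = sorted(carved, key=lambda p: (p[0], p[1]))
--     h = sum(1 for a, b in zip(by_row, by_row[1:]) if a[0] == b[0] and a[1] + 1 == b[1])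
--     by_col = sorted(carved, key=lambda p: (p[1], p[0]))
--     v = sum(1 for a, b in zip(by_col, by_col[1:]) if a[1] == b[1] and a[0] + 1 == b[0])
--     return h + v
-- ===== Notes on version B (the rewrite author's own statement) =====
-- stated objective: alternative
-- what changed: Replaces per-cell hash-set neighbor membership tests with sort-then-scan: sort the cells row-major and count consecutive cells that are horizontal neighbors, then sort column-major and count consecutive vertical neighbors (correct because in a sorted duplicate-free list the immediate lexicographic successor of a cell is the only candidate adjacent cell).
import Mathlib
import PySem

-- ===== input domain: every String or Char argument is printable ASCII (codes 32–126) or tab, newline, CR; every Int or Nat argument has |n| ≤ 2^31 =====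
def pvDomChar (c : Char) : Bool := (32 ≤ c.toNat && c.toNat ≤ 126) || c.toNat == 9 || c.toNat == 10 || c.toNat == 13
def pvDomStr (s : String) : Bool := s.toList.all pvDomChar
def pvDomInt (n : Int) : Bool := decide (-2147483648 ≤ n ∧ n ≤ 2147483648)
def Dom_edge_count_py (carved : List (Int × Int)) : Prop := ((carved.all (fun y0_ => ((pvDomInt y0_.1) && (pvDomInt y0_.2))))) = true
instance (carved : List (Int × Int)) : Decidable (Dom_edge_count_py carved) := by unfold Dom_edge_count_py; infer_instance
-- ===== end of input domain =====

-- B counts carved edges by sort-then-scan (row-major and column-major sorts, counting adjacent consecutive cells) instead of A's per-cell set-membership neighbor checks; equivalence on duplicate-free lists (the set's representation).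


-- ===== PORT A =====
def edge_count_py (carved : List (Int × Int)) : Int :=
  carved.foldl (fun edges p =>
    let edges := if PySem.Set.contains carved (p.1 + 1, p.2) then edges + 1 else edges
    if PySem.Set.contains carved (p.1, p.2 + 1) then edges + 1 else edges) 0

-- ===== PORT B =====
def edge_count_py_alt (carved : List (Int × Int)) : Int :=
  let byRow := PySem.List.sorted2 carved (fun p => p.1) (fun p => p.2)
  let h : Int := ((byRow.zip byRow.tail).countP
    (fun q => q.1.1 == q.2.1 && q.1.2 + 1 == q.2.2) : Int)
  let byCol := PySem.List.sorted2 carved (fun p => p.2) (fun p => p.1)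
  let v : Int := ((byCol.zip byCol.tail).countP
    (fun q => q.1.2 == q.2.2 && q.1.1 + 1 == q.2.1) : Int)
  h + v

-- ===== PRECONDITION & SPEC =====
-- The Python argument is a set; Pre_ is its representation invariant under the type convention
-- (the list holds the set's DISTINCT elements) — it excludes no Python set.
def Pre_edge_count_py (carved : List (Int × Int)) : Prop := carved.Nodup
instance (carved : List (Int × Int)) : Decidable (Pre_edge_count_py carved) := by unfold Pre_edge_count_py; infer_instance
def pvWitness_edge_count_py : (List (Int × Int)) := [((0 : Int), (0 : Int)), ((0 : Int), (1 : Int)), ((1 : Int), (0 : Int))]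

def Spec_edge_count_py (carved : List (Int × Int)) (out : Int) : Prop := out = edge_count_py_alt carved
instance (carved : List (Int × Int)) (out : Int) : Decidable (Spec_edge_count_py carved out) := by unfold Spec_edge_count_py; infer_instance

-- ===== CLAIM (what is proved, stated in full; the proofs are below) =====
def Claim_equal_edge_count_py : Prop := ∀ (carved : List (Int × Int)), Dom_edge_count_py carved → Pre_edge_count_py carved → Spec_edge_count_py carved (edge_count_py carved)

-- ===== LEMMAS AND PROOFS =====

-- the comparison functions B's two sorts use (lexicographic on (row, col) resp. (col, row))
def ltH (a b : Int × Int) : Bool := decide (a.1 < b.1) || (!decide (b.1 < a.1) && decide (a.2 < b.2))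
def ltV (a b : Int × Int) : Bool := decide (a.2 < b.2) || (!decide (b.2 < a.2) && decide (a.1 < b.1))

theorem ltH_iff (a b : Int × Int) : ltH a b = true ↔ (a.1 < b.1 ∨ (¬ b.1 < a.1 ∧ a.2 < b.2)) := by
  simp [ltH]

theorem ltV_iff (a b : Int × Int) : ltV a b = true ↔ (a.2 < b.2 ∨ (¬ b.2 < a.2 ∧ a.1 < b.1)) := by
  simp [ltV]

theorem ltH_asym : ∀ a b, ltH a b = true → ltH b a = false := by
  intro a b h
  rw [Bool.eq_false_iff]
  intro h'
  rw [ltH_iff] at h h'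
  omega

theorem ltH_trans : ∀ a b c, ltH a b = true → ltH b c = true → ltH a c = true := by
  intro a b c h1 h2
  rw [ltH_iff] at h1 h2 ⊢
  omega

theorem ltH_total : ∀ a b : Int × Int, ltH b a = false → a ≠ b → ltH a b = true := by
  intro a b h hne
  have h' : ¬ (b.1 < a.1 ∨ (¬ a.1 < b.1 ∧ b.2 < a.2)) := by
    rw [← ltH_iff]
    simp [h]
  have hne' : ¬ (a.1 = b.1 ∧ a.2 = b.2) := fun hc => hne (Prod.ext hc.1 hc.2)
  rw [ltH_iff]
  omega

theorem ltV_asym : ∀ a b, ltV a b = true → ltV b a = false := by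
  intro a b h
  rw [Bool.eq_false_iff]
  intro h'
  rw [ltV_iff] at h h'
  omega

theorem ltV_trans : ∀ a b c, ltV a b = true → ltV b c = true → ltV a c = true := by
  intro a b c h1 h2
  rw [ltV_iff] at h1 h2 ⊢
  omega

theorem ltV_total : ∀ a b : Int × Int, ltV b a = false → a ≠ b → ltV a b = true := by
  intro a b h hne
  have h' : ¬ (b.2 < a.2 ∨ (¬ a.2 < b.2 ∧ b.1 < a.1)) := by
    rw [← ltV_iff]
    simp [h]
  have hne' : ¬ (a.1 = b.1 ∧ a.2 = b.2) := fun hc => hne (Prod.ext hc.1 hc.2)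
  rw [ltV_iff]
  omega

-- A's loop adds, per element, one for each of the two carved neighbors: it is a sum of two countP's.
theorem edge_count_foldA (s : List (Int × Int)) :
    ∀ (l : List (Int × Int)) (acc : Int),
      l.foldl (fun edges p =>
        let edges := if PySem.Set.contains s (p.1 + 1, p.2) then edges + 1 else edges
        if PySem.Set.contains s (p.1, p.2 + 1) then edges + 1 else edges) acc
      = acc + ((l.countP (fun p => PySem.Set.contains s (p.1 + 1, p.2)) : Int)
             + (l.countP (fun p => PySem.Set.contains s (p.1, p.2 + 1)) : Int)) := by
  intro l
  induction l with
  | nil => intro acc; simp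
  | cons p l ih =>
    intro acc
    simp only [List.foldl_cons, List.countP_cons]
    rw [ih]
    split_ifs <;> simp_all <;> ring

-- insertBy with an asymmetric, transitive 'before' preserves sortedness (Pairwise of ¬ before-swapped).
theorem pairwise_insertBy {α : Type} (before : α → α → Bool)
    (hasym : ∀ a b, before a b = true → before b a = false)
    (htrans : ∀ a b c, before a b = true → before b c = true → before a c = true)
    (x : α) (l : List α) (hl : l.Pairwise (fun a b => before b a = false)) :
    (PySem.List.insertBy before x l).Pairwise (fun a b => before b a = false) := by
  induction l with
  | nil => simp [PySem.List.insertBy]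
  | cons y ys ih =>
    rcases List.pairwise_cons.mp hl with ⟨hy, hys⟩
    by_cases hxy : before x y = true
    · simp only [PySem.List.insertBy, hxy, if_true]
      refine List.pairwise_cons.mpr ⟨?_, hl⟩
      intro z hz
      rcases List.mem_cons.mp hz with rfl | hz
      · exact hasym x z hxy
      · cases h : before z x with
        | false => rfl
        | true =>
          have := htrans z x y h hxy
          rw [hy z hz] at this
          simp at this
    · simp only [PySem.List.insertBy, hxy]
      refine List.pairwise_cons.mpr ⟨?_, ih hys⟩
      intro z hz
      rcases (PySem.List.mem_insertBy before x z ys).mp hz with rfl | hz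
      · cases h : before z y with
        | true => exact absurd h hxy
        | false => rfl
      · exact hy z hz

theorem pairwise_foldl_insertBy {α : Type} (before : α → α → Bool)
    (hasym : ∀ a b, before a b = true → before b a = false)
    (htrans : ∀ a b c, before a b = true → before b c = true → before a c = true) :
    ∀ (xs acc : List α), acc.Pairwise (fun a b => before b a = false) →
      (xs.foldl (fun acc x => PySem.List.insertBy before x acc) acc).Pairwise
        (fun a b => before b a = false) := by
  intro xs
  induction xs with
  | nil => intro acc h; simpa using h
  | cons x xs ih =>
    intro acc h
    exact ih _ (pairwise_insertBy before hasym htrans x acc h)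

-- In a strictly sorted list, the immediate successor f x of x is in the list iff it directly
-- follows x: the count of cells whose successor is present equals the count of consecutive
-- successor pairs.
theorem count_consec {α : Type} [BEq α] [LawfulBEq α] (lt : α → α → Bool) (f : α → α)
    (hf : ∀ x, lt x (f x) = true)
    (hasym : ∀ a b, lt a b = true → lt b a = false)
    (hcover : ∀ x y, lt x y = true → lt y (f x) = true → False) :
    ∀ l : List α, l.Pairwise (fun a b => lt a b = true) →
      ((l.zip l.tail).countP (fun q => q.2 == f q.1))
        = l.countP (fun x => l.contains (f x)) := by
  intro l
  induction l with
  | nil => simp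
  | cons a rest ih =>
    intro hp
    rcases List.pairwise_cons.mp hp with ⟨ha, hrest⟩
    have hne : ∀ x ∈ a :: rest, f x ≠ a := by
      intro x hx heq
      rcases List.mem_cons.mp hx with rfl | hx
      · have h1 := hf x
        have h2 := hasym x (f x) h1
        rw [heq] at h1
        rw [heq] at h2
        rw [h1] at h2
        simp at h2
      · have h1 := hasym a x (ha x hx)
        have h2 := hf x
        rw [heq] at h2
        rw [h2] at h1
        simp at h1
    have hmem : ∀ x ∈ a :: rest, (a :: rest).contains (f x) = rest.contains (f x) := by
      intro x hx
      rw [Bool.eq_iff_iff, List.contains_iff_mem, List.contains_iff_mem, List.mem_cons]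
      constructor
      · rintro (h | h)
        · exact absurd h (hne x hx)
        · exact h
      · exact Or.inr
    cases rest with
    | nil =>
      have h0 := hne a (by simp)
      simp [h0]
    | cons b t =>
      rcases List.pairwise_cons.mp hrest with ⟨hb, _⟩
      have hih := ih hrest
      simp only [List.tail_cons] at hih
      have hcg : List.countP (fun x => (a :: b :: t).contains (f x)) t
          = List.countP (fun x => (b :: t).contains (f x)) t :=
        List.countP_congr (fun x hx => by rw [hmem x (by simp [hx])])
      have hhead : (b == f a) = (b :: t).contains (f a) := by
        rw [Bool.eq_iff_iff, beq_iff_eq, List.contains_iff_mem, List.mem_cons]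
        constructor
        · intro h; exact Or.inl h.symm
        · rintro (h | h)
          · exact h.symm
          · exact (hcover a b (ha b (by simp)) (hb (f a) h)).elim
      simp only [List.tail_cons, List.zip_cons_cons, List.countP_cons]
      rw [hih, hcg, hmem b (by simp), hmem a (by simp), ← hhead, List.countP_cons]

-- one direction of B: the consecutive-pair count of one sorted pass equals A's per-cell count
theorem sorted_pass_count (before : (Int × Int) → (Int × Int) → Bool)
    (f : (Int × Int) → (Int × Int))
    (hasym : ∀ a b, before a b = true → before b a = false)
    (htrans : ∀ a b c, before a b = true → before b c = true → before a c = true)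
    (htotal : ∀ a b, before b a = false → a ≠ b → before a b = true)
    (hf : ∀ x, before x (f x) = true)
    (hcover : ∀ x y, before x y = true → before y (f x) = true → False)
    (carved : List (Int × Int)) (hn : carved.Nodup)
    (s : List (Int × Int)) (hs : s = carved.foldl (fun acc x => PySem.List.insertBy before x acc) [])
    (hperm : s.Perm carved) :
    ((s.zip s.tail).countP (fun q => q.2 == f q.1))
      = carved.countP (fun x => PySem.Set.contains carved (f x)) := by
  have hsort : s.Pairwise (fun a b => before b a = false) := by
    rw [hs]
    exact pairwise_foldl_insertBy before hasym htrans carved [] (by simp)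
  have hnd : s.Nodup := hperm.nodup_iff.mpr hn
  have hstrict : s.Pairwise (fun a b => before a b = true) :=
    (hsort.and hnd).imp (fun h => htotal _ _ h.1 h.2)
  rw [count_consec before f hf hasym hcover s hstrict]
  calc List.countP (fun x => s.contains (f x)) s
      = List.countP (fun x => carved.contains (f x)) s :=
        List.countP_congr (fun x _ => by
          rw [List.contains_iff_mem, List.contains_iff_mem, hperm.mem_iff])
    _ = List.countP (fun x => carved.contains (f x)) carved := hperm.countP_eq _
    _ = List.countP (fun x => PySem.Set.contains carved (f x)) carved := rfl

-- ===== VERDICT (by name: the statement is the Claim_ definition above) =====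
theorem edge_count_py_spec : Claim_equal_edge_count_py := by
  intro carved _ hn
  have hrowdef : PySem.List.sorted2 carved (fun p => p.1) (fun p => p.2)
      = carved.foldl (fun acc x => PySem.List.insertBy ltH x acc) [] := rfl
  have hcoldef : PySem.List.sorted2 carved (fun p => p.2) (fun p => p.1)
      = carved.foldl (fun acc x => PySem.List.insertBy ltV x acc) [] := rfl
  have hH := sorted_pass_count ltH (fun p => (p.1, p.2 + 1)) ltH_asym ltH_trans ltH_total
    (by intro x; rw [ltH_iff]; dsimp only; omega)
    (by intro x y h1 h2; rw [ltH_iff] at h1 h2; dsimp only at h2; omega)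
    carved hn _ hrowdef (PySem.List.sorted2_perm carved _ _ false)
  have hV := sorted_pass_count ltV (fun p => (p.1 + 1, p.2)) ltV_asym ltV_trans ltV_total
    (by intro x; rw [ltV_iff]; dsimp only; omega)
    (by intro x y h1 h2; rw [ltV_iff] at h1 h2; dsimp only at h2; omega)
    carved hn _ hcoldef (PySem.List.sorted2_perm carved _ _ false)
  dsimp only at hH hV
  have hA : edge_count_py carved
      = ((carved.countP (fun p => PySem.Set.contains carved (p.1 + 1, p.2)) : Int)
       + (carved.countP (fun p => PySem.Set.contains carved (p.1, p.2 + 1)) : Int)) := by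
    unfold edge_count_py
    rw [edge_count_foldA carved carved 0]
    ring
  have hB : edge_count_py_alt carved
      = ((carved.countP (fun p => PySem.Set.contains carved (p.1, p.2 + 1)) : Int)
       + (carved.countP (fun p => PySem.Set.contains carved (p.1 + 1, p.2)) : Int)) := by
    simp only [edge_count_py_alt]
    have hbrH : ∀ l : List ((Int × Int) × (Int × Int)),
        l.countP (fun q => q.1.1 == q.2.1 && q.1.2 + 1 == q.2.2)
          = l.countP (fun q => q.2 == (q.1.1, q.1.2 + 1)) := fun l =>
      List.countP_congr (fun q _ => by
        rcases q with ⟨⟨a1, a2⟩, ⟨b1, b2⟩⟩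
        simp only [Bool.and_eq_true, beq_iff_eq, Prod.mk.injEq]
        constructor <;> (rintro ⟨h1, h2⟩; exact ⟨h1.symm, h2.symm⟩))
    have hbrV : ∀ l : List ((Int × Int) × (Int × Int)),
        l.countP (fun q => q.1.2 == q.2.2 && q.1.1 + 1 == q.2.1)
          = l.countP (fun q => q.2 == (q.1.1 + 1, q.1.2)) := fun l =>
      List.countP_congr (fun q _ => by
        rcases q with ⟨⟨a1, a2⟩, ⟨b1, b2⟩⟩
        simp only [Bool.and_eq_true, beq_iff_eq, Prod.mk.injEq]
        constructor <;> (rintro ⟨h1, h2⟩; exact ⟨h2.symm, h1.symm⟩))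
    rw [hbrH, hbrV, hH, hV]
  unfold Spec_edge_count_py
  rw [hA, hB]
  ring
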